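-- pv_equiv track=rewrite | github.com/Tom-0727/researcher-zero | core/skills/file_manage/scripts/edit_blocks.py | _indent_flexible_replace
-- ===== SOURCE A (Python) =====
-- def _indent_flexible_replace(
--     whole_lines: list[str], search_lines: list[str], replace_lines: list[str]
-- ) -> str | None:
--     if not search_lines:
--         return None
--
--     leading = [len(l) - len(l.lstrip()) for l in search_lines + replace_lines if l.strip()]
--     if leading and min(leading) > 0:
--         outdent = min(leading)
--         search_lines = [line[outdent:] if line.strip() else line for line in search_lines]
--         replace_lines = [line[outdent:] if line.strip() else line for line in replace_lines]
--
--     n = len(search_lines)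
--     for idx in range(len(whole_lines) - n + 1):
--         window = whole_lines[idx : idx + n]
--         if not all(window[j].lstrip() == search_lines[j].lstrip() for j in range(n)):
--             continue
--
--         prefixes = {
--             window[j][: len(window[j]) - len(search_lines[j])]
--             for j in range(n)
--             if window[j].strip()
--         }
--         if len(prefixes) != 1:
--             continue
--
--         prefix = next(iter(prefixes))
--         patched = [prefix + line if line.strip() else line for line in replace_lines]
--         merged = whole_lines[:idx] + patched + whole_lines[idx + n :]
--         return "".join(merged)
--     return None
-- ===== SOURCE B (Python) =====
-- def _indent_flexible_replace(
--     whole_lines: list[str], search_lines: list[str], replace_lines: list[str]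
-- ) -> str | None:
--     if not search_lines:
--         return None
--
--     leading = [len(l) - len(l.lstrip()) for l in search_lines + replace_lines if l.strip()]
--     if leading and min(leading) > 0:
--         outdent = min(leading)
--         search_lines = [line[outdent:] if line.strip() else line for line in search_lines]
--         replace_lines = [line[outdent:] if line.strip() else line for line in replace_lines]
--
--     n = len(search_lines)
--     whole_keys = [l.lstrip() for l in whole_lines]
--     search_keys = [l.lstrip() for l in search_lines]
--
--     # Hash index built in one pass: lstripped line -> list of its positions.
--     # Only positions of the first search key are candidates; all other start
--     # positions are never examined.
--     index = {}
--     for i, key in enumerate(whole_keys):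
--         index.setdefault(key, []).append(i)
--
--     for idx in index.get(search_keys[0], []):
--         if idx + n > len(whole_lines):
--             continue
--         if whole_keys[idx : idx + n] != search_keys:
--             continue
--         window = whole_lines[idx : idx + n]
--         prefixes = [w[: len(w) - len(s)] for w, s in zip(window, search_lines) if w.strip()]
--         if not prefixes or any(p != prefixes[0] for p in prefixes):
--             continue
--         prefix = prefixes[0]
--         patched = [prefix + line if line.strip() else line for line in replace_lines]
--         return "".join(whole_lines[:idx] + patched + whole_lines[idx + n :])
--     return None
-- ===== Notes on version B (the rewrite author's own statement) =====
-- stated objective: alternative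
-- what changed: A's sliding loop over every start index, re-lstripping each window and building a prefix set per window, is replaced by staged passes: lstrip every line once, build a hash index from lstripped line to its positions, and examine only the positions of the first search key, comparing precomputed key slices and a first-element prefix check.
import Mathlib
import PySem

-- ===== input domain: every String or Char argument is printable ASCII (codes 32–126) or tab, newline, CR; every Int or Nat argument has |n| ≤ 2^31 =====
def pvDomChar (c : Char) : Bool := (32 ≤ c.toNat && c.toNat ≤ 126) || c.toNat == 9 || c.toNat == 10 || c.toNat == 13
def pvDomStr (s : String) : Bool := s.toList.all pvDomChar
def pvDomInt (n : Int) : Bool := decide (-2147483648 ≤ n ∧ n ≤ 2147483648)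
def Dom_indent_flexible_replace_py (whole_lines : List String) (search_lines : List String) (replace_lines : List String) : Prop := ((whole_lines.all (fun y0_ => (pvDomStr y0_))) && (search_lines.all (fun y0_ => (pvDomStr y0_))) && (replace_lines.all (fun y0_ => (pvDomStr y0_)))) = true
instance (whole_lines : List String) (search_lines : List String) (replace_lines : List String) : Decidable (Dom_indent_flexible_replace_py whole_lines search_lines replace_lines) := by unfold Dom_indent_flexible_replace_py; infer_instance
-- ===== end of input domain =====

-- B replaces A's sliding loop over every start index (re-lstripping each window, prefix set
-- per window) by staged passes: lstrip every line once, a hash index from lstripped line to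
-- its positions, and a check only at positions of the first search key; objective: alternative.

-- ===== PORT A =====

-- A: `line[outdent:] if line.strip() else line`
def aOutdentLine (outdent : Int) (line : String) : String :=
  if PySem.Str.strip line != "" then PySem.Str.slice line (some outdent) none else line

-- A: common preprocessing: outdent search/replace when every non-blank line is indented
def aPrep (search_lines replace_lines : List String) : List String × List String :=
  let leading := ((search_lines ++ replace_lines).filter
      (fun l => PySem.Str.strip l != "")).map
      (fun l => PySem.Str.len l - PySem.Str.len (PySem.Str.lstrip l))
  match PySem.List.min? leading (fun x => x) with
  | some m =>
      if m > 0 then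
        (search_lines.map (aOutdentLine m), replace_lines.map (aOutdentLine m))
      else (search_lines, replace_lines)
  | none => (search_lines, replace_lines)

-- A: the body of one loop iteration up to `prefix = next(iter(prefixes))`:
-- the `all(...)` check, the prefix set, and (when the set has exactly one element)
-- that element; `next(iter(prefixes))` is exact here because the set is a singleton.
-- window[j]/search[j] are always in range (both lists have length n), so getD is exact.
def aWindowCheck (window search : List String) (n : Nat) : Option String :=
  if (List.range n).all (fun j =>
      PySem.Str.lstrip (window.getD j "") == PySem.Str.lstrip (search.getD j "")) then
    let prefixes : PySem.Set String := PySem.Set.ofList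
      (((List.range n).filter (fun j => PySem.Str.strip (window.getD j "") != "")).map
        (fun j => PySem.Str.slice (window.getD j "") none
          (some (PySem.Str.len (window.getD j "") - PySem.Str.len (search.getD j "")))))
    if PySem.Set.len prefixes == 1 then prefixes.head? else none
  else none

-- A: one iteration of the for loop (continue = none, return = some)
def aTry (whole search replace : List String) (n : Nat) (idx : Nat) : Option String :=
  let window := PySem.List.slice whole (some (idx : Int)) (some ((idx : Int) + (n : Int)))
  match aWindowCheck window search n with
  | none => none
  | some p =>
      let patched := replace.map (fun line =>
        if PySem.Str.strip line != "" then p ++ line else line)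
      some (PySem.Str.join ""
        (PySem.List.slice whole none (some (idx : Int)) ++ patched ++
         PySem.List.slice whole (some ((idx : Int) + (n : Int))) none))

def indent_flexible_replace_py (whole_lines : List String) (search_lines : List String) (replace_lines : List String) : Option String :=
  if search_lines == [] then none
  else
    let sr := aPrep search_lines replace_lines
    let n := sr.1.length
    -- range(len(whole_lines) - n + 1): empty when the Int argument is ≤ 0, which for
    -- n ≥ 1 coincides with the Nat count whole_lines.length + 1 - n
    (List.range (whole_lines.length + 1 - n)).findSome?
      (fun idx => aTry whole_lines sr.1 sr.2 n idx)

-- ===== PORT B =====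

-- B: `line[outdent:] if line.strip() else line` (Source B repeats A's preprocessing verbatim)
def bOutdentLine (outdent : Int) (line : String) : String :=
  if PySem.Str.strip line != "" then PySem.Str.slice line (some outdent) none else line

def bPrep (search_lines replace_lines : List String) : List String × List String :=
  let leading := ((search_lines ++ replace_lines).filter
      (fun l => PySem.Str.strip l != "")).map
      (fun l => PySem.Str.len l - PySem.Str.len (PySem.Str.lstrip l))
  match PySem.List.min? leading (fun x => x) with
  | some m =>
      if m > 0 then
        (search_lines.map (bOutdentLine m), replace_lines.map (bOutdentLine m))
      else (search_lines, replace_lines)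
  | none => (search_lines, replace_lines)

-- B: `[l.lstrip() for l in ls]`
def bKeys (ls : List String) : List String := ls.map PySem.Str.lstrip

-- B: `for i, key in enumerate(whole_keys): index.setdefault(key, []).append(i)`
-- (setdefault-then-append stores d.getD key [] ++ [i] back under key)
def bIndex (keys : List String) : PySem.Dict String (List Int) :=
  (PySem.List.enumerate keys).foldl
    (fun d p => d.insert p.2 (d.getD p.2 [] ++ [p.1])) PySem.Dict.empty

-- B: one iteration of `for idx in index.get(search_keys[0], [])` (continue = none)
def bTry (whole wkeys skeys search replace : List String) (n : Nat) (idx : Int) : Option String :=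
  if idx + (n : Int) > (whole.length : Int) then none
  else if PySem.List.slice wkeys (some idx) (some (idx + (n : Int))) != skeys then none
  else
    let window := PySem.List.slice whole (some idx) (some (idx + (n : Int)))
    let prefixes := (window.zip search).filterMap (fun p =>
      if PySem.Str.strip p.1 != "" then
        some (PySem.Str.slice p.1 none (some (PySem.Str.len p.1 - PySem.Str.len p.2)))
      else none)
    match prefixes with
    | [] => none
    | p0 :: rest =>
        if (p0 :: rest).any (fun p => p != p0) then none
        else
          let patched := replace.map (fun line =>
            if PySem.Str.strip line != "" then p0 ++ line else line)
          some (PySem.Str.join ""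
            (PySem.List.slice whole none (some idx) ++ patched ++
             PySem.List.slice whole (some (idx + (n : Int))) none))

def indent_flexible_replace_py_alt (whole_lines : List String) (search_lines : List String) (replace_lines : List String) : Option String :=
  if search_lines == [] then none
  else
    let sr := bPrep search_lines replace_lines
    let n := sr.1.length
    let wkeys := bKeys whole_lines
    let skeys := bKeys sr.1
    -- search_keys[0] never raises here (n ≥ 1), so headD is exact
    ((bIndex wkeys).getD (skeys.headD "") []).findSome?
      (fun idx => bTry whole_lines wkeys skeys sr.1 sr.2 n idx)

-- ===== PRECONDITION & SPEC =====
def Spec_indent_flexible_replace_py (whole_lines : List String) (search_lines : List String) (replace_lines : List String) (out : Option String) : Prop := out = indent_flexible_replace_py_alt whole_lines search_lines replace_lines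
instance (whole_lines : List String) (search_lines : List String) (replace_lines : List String) (out : Option String) : Decidable (Spec_indent_flexible_replace_py whole_lines search_lines replace_lines out) := by unfold Spec_indent_flexible_replace_py; infer_instance

-- ===== CLAIM (what is proved, stated in full; the proofs are below) =====
def Claim_equal_indent_flexible_replace_py : Prop := ∀ (whole_lines : List String) (search_lines : List String) (replace_lines : List String), Dom_indent_flexible_replace_py whole_lines search_lines replace_lines → Spec_indent_flexible_replace_py whole_lines search_lines replace_lines (indent_flexible_replace_py whole_lines search_lines replace_lines)

-- ===== LEMMAS AND PROOFS =====

theorem bPrep_eq_aPrep : bPrep = aPrep := rfl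

-- zip forms of A's range-indexed window scans
def zAll (ws ss : List String) : Bool :=
  (ws.zip ss).all (fun p => PySem.Str.lstrip p.1 == PySem.Str.lstrip p.2)

def zPref (ws ss : List String) : List String :=
  (ws.zip ss).filterMap (fun p =>
    if PySem.Str.strip p.1 != "" then
      some (PySem.Str.slice p.1 none (some (PySem.Str.len p.1 - PySem.Str.len p.2)))
    else none)

def setCheck (L : List String) : Option String :=
  let s : PySem.Set String := PySem.Set.ofList L
  if PySem.Set.len s == 1 then s.head? else none

theorem range_all_eq (f : String → String → Bool) (ws ss : List String)
    (h : ws.length = ss.length) :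
    ((List.range ws.length).all (fun j => f (ws.getD j "") (ss.getD j ""))) =
      (ws.zip ss).all (fun p => f p.1 p.2) := by
  induction ws generalizing ss with
  | nil => cases ss with
    | nil => simp
    | cons s ss => simp at h
  | cons w ws ih =>
    cases ss with
    | nil => simp at h
    | cons s ss =>
      simp only [List.length_cons, List.range_succ_eq_map, List.all_cons, List.all_map,
        List.getD_cons_zero, List.zip_cons_cons, Function.comp_def, List.getD_cons_succ]
      rw [ih ss (by simpa using h)]

theorem range_pref_eq (P : String → Bool) (g : String → String → String) (ws ss : List String)
    (h : ws.length = ss.length) :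
    (((List.range ws.length).filter (fun j => P (ws.getD j ""))).map
        (fun j => g (ws.getD j "") (ss.getD j ""))) =
      (ws.zip ss).filterMap (fun p => if P p.1 then some (g p.1 p.2) else none) := by
  induction ws generalizing ss with
  | nil => cases ss with
    | nil => simp
    | cons s ss => simp at h
  | cons w ws ih =>
    cases ss with
    | nil => simp at h
    | cons s ss =>
      simp only [List.length_cons, List.range_succ_eq_map, List.filter_cons, List.filter_map,
        List.getD_cons_zero, List.zip_cons_cons, List.filterMap_cons]
      by_cases hp : P w
      · simp only [hp, if_pos, List.map_cons, List.map_map, Function.comp_def,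
          List.getD_cons_succ, List.getD_cons_zero]
        rw [ih ss (by simpa using h)]
      · simp only [hp, Bool.false_eq_true, if_neg, not_false_iff, List.map_map,
          Function.comp_def, List.getD_cons_succ]
        rw [ih ss (by simpa using h)]

theorem setCheck_dup (q : String) (L : List String) : setCheck (q :: q :: L) = setCheck (q :: L) := by
  simp [setCheck, PySem.Set.ofList_eq_foldl, PySem.Set.add, PySem.Set.contains]

theorem setCheck_two_ne (q p : String) (L : List String) (h : q ≠ p) :
    setCheck (q :: p :: L) = none := by
  simp only [setCheck]
  by_cases hlen : PySem.Set.len (PySem.Set.ofList (q :: p :: L)) == 1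
  · exfalso
    have h1 : (PySem.Set.ofList (q :: p :: L)).length = 1 := by
      have := beq_iff_eq.mp hlen
      simp only [PySem.Set.len] at this
      exact_mod_cast this
    obtain ⟨x, hx⟩ := List.length_eq_one_iff.mp h1
    have hq : q ∈ PySem.Set.ofList (q :: p :: L) := (PySem.Set.mem_ofList _ _).mpr (by simp)
    have hp : p ∈ PySem.Set.ofList (q :: p :: L) := (PySem.Set.mem_ofList _ _).mpr (by simp)
    rw [hx] at hq hp
    simp at hq hp
    exact h (hq.trans hp.symm)
  · exact if_neg hlen

theorem setCheck_cons (p0 : String) (rest : List String) :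
    setCheck (p0 :: rest) = if rest.any (fun p => p != p0) then none else some p0 := by
  induction rest with
  | nil =>
    simp [setCheck, PySem.Set.ofList_eq_foldl, PySem.Set.add, PySem.Set.contains, PySem.Set.len]
  | cons b t ih =>
    by_cases hb : b = p0
    · subst hb
      rw [setCheck_dup, ih]
      simp
    · rw [setCheck_two_ne p0 b t (fun h => hb h.symm)]
      have : (b != p0) = true := bne_iff_ne.mpr hb
      simp [this]

theorem aWindowCheck_zip (ws ss : List String) (h : ws.length = ss.length) :
    aWindowCheck ws ss ss.length = if zAll ws ss then setCheck (zPref ws ss) else none := by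
  unfold aWindowCheck
  rw [← h,
    range_all_eq (fun a b => PySem.Str.lstrip a == PySem.Str.lstrip b) ws ss h,
    range_pref_eq (fun a => PySem.Str.strip a != "")
      (fun a b => PySem.Str.slice a none (some (PySem.Str.len a - PySem.Str.len b))) ws ss h]
  rfl

theorem aPrep_fst_length (search replace : List String) :
    (aPrep search replace).1.length = search.length := by
  unfold aPrep
  dsimp only
  split
  · split <;> simp
  · rfl

-- list equality of mapped lists as a zip-wise check
theorem map_beq_zip (f : String → String) (ws ss : List String) (h : ws.length = ss.length) :
    ((ws.map f) == (ss.map f)) = (ws.zip ss).all (fun p => f p.1 == f p.2) := by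
  induction ws generalizing ss with
  | nil => cases ss with
    | nil => rfl
    | cons s ss => simp at h
  | cons w ws ih =>
    cases ss with
    | nil => simp at h
    | cons s ss =>
      simp only [List.map_cons, List.cons_beq_cons, List.zip_cons_cons, List.all_cons]
      rw [ih ss (by simpa using h)]

-- findSome? over a filterMap
theorem findSome?_filterMap {α β γ : Type} (l : List α) (f : α → Option β) (g : β → Option γ) :
    (l.filterMap f).findSome? g = l.findSome? (fun x => (f x).bind g) := by
  induction l with
  | nil => rfl
  | cons x t ih =>
    cases hf : f x with
    | none => simp [hf, ih]
    | some b =>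
      simp only [List.filterMap_cons, hf, List.findSome?_cons, Option.bind_some]
      cases g b <;> simp [ih]

-- findSome? respects pointwise equality on members
theorem findSome?_congr_mem {α β : Type} (l : List α) (f g : α → Option β)
    (h : ∀ x ∈ l, f x = g x) : l.findSome? f = l.findSome? g := by
  induction l with
  | nil => rfl
  | cons x t ih =>
    simp only [List.findSome?_cons]
    rw [h x (by simp), ih (fun y hy => h y (by simp [hy]))]

-- the dict built by `index.setdefault(key, []).append(i)` holds, under k, the first
-- components of the enumerated pairs whose key is k, in order
theorem bIndex_fold_getD (l : List (Int × String)) :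
    ∀ (d : PySem.Dict String (List Int)) (k : String),
      ((l.foldl (fun d p => d.insert p.2 (d.getD p.2 [] ++ [p.1])) d).getD k []) =
        d.getD k [] ++ l.filterMap (fun p => if p.2 == k then some p.1 else none) := by
  induction l with
  | nil => intro d k; simp
  | cons p t ih =>
    intro d k
    simp only [List.foldl_cons, List.filterMap_cons]
    rw [ih]
    by_cases hk : k = p.2
    · subst hk
      rw [PySem.Dict.getD_insert]
      simp
    · rw [PySem.Dict.getD_insert]
      have : (p.2 == k) = false := by simp; exact fun h => hk h.symm
      simp [hk, this]

-- findSome? over an enumeration as findSome? over indices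
theorem enum_findSome?_aux (F : Int → String → Option String) :
    ∀ (keys : List String) (s : Nat),
      (PySem.List.enumerate keys (s : Int)).findSome? (fun p => F p.1 p.2) =
        (List.range keys.length).findSome? (fun i => F ((s + i : Nat) : Int) (keys.getD i "")) := by
  intro keys
  induction keys with
  | nil => intro s; rfl
  | cons x xs ih =>
    intro s
    rw [PySem.List.enumerate_cons]
    simp only [List.findSome?_cons, List.length_cons, List.range_succ_eq_map,
      List.findSome?_map, Function.comp_def, List.getD_cons_zero, List.getD_cons_succ,
      Nat.add_zero]
    have hc : ((s : Int) + 1) = (((s + 1 : Nat)) : Int) := by push_cast; ring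
    rw [hc, ih (s + 1)]
    cases hF : F (s : Int) x with
    | some v => rfl
    | none =>
      apply findSome?_congr_mem
      intro i _
      have : ((s + 1 + i : Nat) : Int) = ((s + (i + 1) : Nat) : Int) := by push_cast; ring
      rw [this]

theorem enum_findSome?_zero (F : Int → String → Option String) (keys : List String) :
    (PySem.List.enumerate keys 0).findSome? (fun p => F p.1 p.2) =
      (List.range keys.length).findSome? (fun (i : Nat) => F (i : Int) (keys.getD i "")) := by
  have h := enum_findSome?_aux F keys 0
  simpa using h

theorem zAll_cons (w s : String) (ws ss : List String) :
    zAll (w :: ws) (s :: ss) = ((PySem.Str.lstrip w == PySem.Str.lstrip s) && zAll ws ss) := by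
  simp [zAll]

theorem setCheck_nil : setCheck ([] : List String) = none := rfl

-- the guarded scan over all of range W equals A's scan over range (W+1-n)
theorem range_guard_findSome? (W n : Nat) (hn : 0 < n) (f : Nat → Option String) :
    (List.range W).findSome? (fun i => if i + n ≤ W then f i else none) =
      (List.range (W + 1 - n)).findSome? f := by
  by_cases hW : n ≤ W
  · have hsplit : List.range W = List.range ((W + 1 - n) + (n - 1)) := by
      congr 1; omega
    rw [hsplit, List.range_add, List.findSome?_append]
    have h1 : (List.range (W + 1 - n)).findSome? (fun i => if i + n ≤ W then f i else none) =
        (List.range (W + 1 - n)).findSome? f := by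
      apply findSome?_congr_mem
      intro i hi
      rw [if_pos (by have := List.mem_range.mp hi; omega)]
    have h2 : (((List.range (n - 1)).map (fun j => (W + 1 - n) + j)).findSome?
        (fun i => if i + n ≤ W then f i else none)) = none := by
      rw [List.findSome?_eq_none_iff]
      intro i hi
      obtain ⟨j, hj, rfl⟩ := List.mem_map.mp hi
      rw [if_neg (by have := List.mem_range.mp hj; omega)]
    rw [h1, h2, Option.or_none]
  · have h0 : W + 1 - n = 0 := by omega
    rw [h0]
    simp only [List.range_zero, List.findSome?_nil]
    rw [List.findSome?_eq_none_iff]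
    intro i hi
    rw [if_neg (by have := List.mem_range.mp hi; omega)]

-- one candidate position against one iteration of A's loop
theorem step_eq (whole replace : List String) (s0 : String) (ss : List String) (i : Nat)
    (hi : i < whole.length) :
    (if (bKeys whole).getD i "" == (bKeys (s0 :: ss)).headD "" then
       bTry whole (bKeys whole) (bKeys (s0 :: ss)) (s0 :: ss) replace (ss.length + 1) (i : Int)
     else none)
    = if i + (ss.length + 1) ≤ whole.length then
        aTry whole (s0 :: ss) replace (ss.length + 1) i else none := by
  have h1 : (bKeys whole).getD i "" = PySem.Str.lstrip whole[i] := by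
    rw [bKeys, List.getD_eq_getElem _ _ (by simpa using hi), List.getElem_map]
  have hkey : (bKeys (s0 :: ss)).headD "" = PySem.Str.lstrip s0 := rfl
  rw [h1, hkey]
  have hwin : PySem.List.slice whole (some (i : Int))
      (some ((i : Int) + ((ss.length + 1 : Nat) : Int))) =
      (whole.drop i).take (ss.length + 1) := PySem.List.slice_natCast_add whole i (ss.length + 1)
  by_cases hle : i + (ss.length + 1) ≤ whole.length
  · rw [if_pos hle]
    have hlen : ((whole.drop i).take (ss.length + 1)).length = ss.length + 1 := by
      simp only [List.length_take, List.length_drop]; omega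
    have hdrop : whole.drop i = whole[i] :: whole.drop (i + 1) := List.drop_eq_getElem_cons hi
    have hwc : aWindowCheck ((whole.drop i).take (ss.length + 1)) (s0 :: ss) (ss.length + 1) =
        if zAll ((whole.drop i).take (ss.length + 1)) (s0 :: ss) then
          setCheck (zPref ((whole.drop i).take (ss.length + 1)) (s0 :: ss)) else none :=
      aWindowCheck_zip _ _ (by rw [hlen]; rfl)
    by_cases hk : PySem.Str.lstrip whole[i] == PySem.Str.lstrip s0
    · rw [if_pos hk]
      rw [bTry, aTry]
      have hgt : ¬ ((i : Int) + ((ss.length + 1 : Nat) : Int) > (whole.length : Int)) := by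
        push_cast; omega
      rw [if_neg hgt]
      have hks : PySem.List.slice (bKeys whole) (some (i : Int))
          (some ((i : Int) + ((ss.length + 1 : Nat) : Int))) =
          ((whole.drop i).take (ss.length + 1)).map PySem.Str.lstrip := by
        rw [bKeys, PySem.List.slice_natCast_add, List.map_take, List.map_drop]
      rw [hks, hwin, hwc]
      have hbeq : ((((whole.drop i).take (ss.length + 1)).map PySem.Str.lstrip) ==
          ((s0 :: ss).map PySem.Str.lstrip)) =
          zAll ((whole.drop i).take (ss.length + 1)) (s0 :: ss) :=
        map_beq_zip _ _ _ (by rw [hlen]; rfl)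
      by_cases hz : zAll ((whole.drop i).take (ss.length + 1)) (s0 :: ss)
      · have hne : ((((whole.drop i).take (ss.length + 1)).map PySem.Str.lstrip) !=
            (bKeys (s0 :: ss))) = false := by
          rw [bKeys, bne, hbeq, hz]; rfl
        rw [hne, hz]
        simp only [Bool.false_eq_true, if_false, if_true]
        have hzp : (((whole.drop i).take (ss.length + 1)).zip (s0 :: ss)).filterMap
            (fun p => if PySem.Str.strip p.1 != "" then
              some (PySem.Str.slice p.1 none
                (some (PySem.Str.len p.1 - PySem.Str.len p.2)))
            else none) = zPref ((whole.drop i).take (ss.length + 1)) (s0 :: ss) := rfl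
        rw [hzp]
        cases hL : zPref ((whole.drop i).take (ss.length + 1)) (s0 :: ss) with
        | nil => rw [setCheck_nil]
        | cons p0 rest =>
          rw [setCheck_cons]
          have hany : ((p0 :: rest).any (fun p => p != p0)) = rest.any (fun p => p != p0) := by
            simp [List.any_cons]
          by_cases ha : rest.any (fun p => p != p0)
          · simp [hany, ha]
          · simp [hany, ha]
      · have hne : ((((whole.drop i).take (ss.length + 1)).map PySem.Str.lstrip) !=
            (bKeys (s0 :: ss))) = true := by
          rw [bKeys, bne, hbeq]
          simp [hz]
        have hzf : zAll ((whole.drop i).take (ss.length + 1)) (s0 :: ss) = false := by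
          simpa using hz
        rw [hne, hzf]
        simp
    · rw [if_neg hk]
      rw [aTry, hwin, hwc]
      have hz : zAll ((whole.drop i).take (ss.length + 1)) (s0 :: ss) = false := by
        rw [hdrop, List.take_succ_cons, zAll_cons]
        simp only [Bool.and_eq_false_iff]
        left
        simpa using hk
      rw [hz]
      simp
  · rw [if_neg hle]
    by_cases hk : PySem.Str.lstrip whole[i] == PySem.Str.lstrip s0
    · rw [if_pos hk, bTry]
      rw [if_pos (by push_cast; omega)]
    · rw [if_neg hk]

-- ===== VERDICT (by name: the statement is the Claim_ definition above) =====
theorem indent_flexible_replace_py_spec : Claim_equal_indent_flexible_replace_py := by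
  intro whole search replace _
  unfold Spec_indent_flexible_replace_py indent_flexible_replace_py indent_flexible_replace_py_alt
  by_cases hs : search == []
  · simp [hs]
  · simp only [hs, Bool.false_eq_true, if_neg, not_false_iff, bPrep_eq_aPrep]
    have hne : search ≠ [] := fun h => by rw [h] at hs; exact hs rfl
    obtain ⟨s0, ss, hsr⟩ : ∃ s0 ss, (aPrep search replace).1 = s0 :: ss := by
      cases hsp : (aPrep search replace).1 with
      | nil =>
        exfalso
        have := aPrep_fst_length search replace
        rw [hsp] at this
        exact hne (List.eq_nil_of_length_eq_zero this.symm)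
      | cons a t => exact ⟨a, t, rfl⟩
    rw [hsr]
    have hcand : (bIndex (bKeys whole)).getD ((bKeys (s0 :: ss)).headD "") [] =
        (PySem.List.enumerate (bKeys whole) 0).filterMap
          (fun p => if p.2 == (bKeys (s0 :: ss)).headD "" then some p.1 else none) := by
      rw [bIndex, bIndex_fold_getD]
      rfl
    have hB : ((bIndex (bKeys whole)).getD ((bKeys (s0 :: ss)).headD "") []).findSome?
        (fun idx => bTry whole (bKeys whole) (bKeys (s0 :: ss)) (s0 :: ss)
          (aPrep search replace).2 (s0 :: ss).length idx)
        = (List.range (whole.length + 1 - (ss.length + 1))).findSome?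
          (fun idx => aTry whole (s0 :: ss) (aPrep search replace).2 (ss.length + 1) idx) := by
      rw [hcand, findSome?_filterMap]
      rw [findSome?_congr_mem (PySem.List.enumerate (bKeys whole) 0) _
        (fun p => if p.2 == (bKeys (s0 :: ss)).headD "" then
            bTry whole (bKeys whole) (bKeys (s0 :: ss)) (s0 :: ss)
              (aPrep search replace).2 (s0 :: ss).length p.1
          else none)
        (fun p _ => by
          by_cases h : (p.2 == (bKeys (s0 :: ss)).headD "") = true
          · simp only [if_pos h, Option.bind_some]
          · simp only [if_neg h, Option.bind_none])]
      rw [enum_findSome?_zero (fun a b =>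
        if (b == (bKeys (s0 :: ss)).headD "") = true then
          bTry whole (bKeys whole) (bKeys (s0 :: ss)) (s0 :: ss)
            (aPrep search replace).2 (s0 :: ss).length a
        else none) (bKeys whole)]
      simp only [List.length_cons]
      rw [findSome?_congr_mem _ _
        (fun i => if i + (ss.length + 1) ≤ whole.length then
            aTry whole (s0 :: ss) (aPrep search replace).2 (ss.length + 1) i else none)
        (fun i hi => step_eq whole (aPrep search replace).2 s0 ss i (by
          have := List.mem_range.mp hi
          simpa [bKeys] using this))]
      have hWlen : (bKeys whole).length = whole.length := by simp [bKeys]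
      rw [hWlen]
      rw [range_guard_findSome? whole.length (ss.length + 1) (by omega)]
    rw [hB]
    simp only [List.length_cons]
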